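-- pv_equiv track=rewrite | github.com/fe-bit/employee-scheduler | employee-scheduler-backend/shifts.py | get_shifts_per_employee
-- ===== SOURCE A (Python) =====
-- def get_shifts_per_employee(shifts, genes):
--     result = {}
--     for shift, gene in zip(shifts, genes):
--         if gene in result:
--             result[gene].append(shift)
--         else:
--             result[gene] = [shift]
--     for gene in result:
--         result[gene] = sorted(result[gene], key=lambda x: x[0], reverse=False)
--
--     return result
-- ===== SOURCE B (Python) =====
-- def get_shifts_per_employee(shifts, genes):
--     # One global stable sort by start, then a single grouping pass.
--     pairs = sorted(zip(shifts, genes), key=lambda p: p[0][0])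
--     result = {}
--     for _shift, gene in zip(shifts, genes):   # keys in first-appearance order, as in A
--         if gene not in result:
--             result[gene] = []
--     for shift, gene in pairs:
--         result[gene].append(shift)
--     return result
-- ===== Notes on version B (the rewrite author's own statement) =====
-- stated objective: alternative
-- what changed: Instead of grouping first and then sorting each group separately, B sorts the zipped (shift, gene) pairs once with a single global stable sort by start and then distributes them into the groups in one pass (keys pre-registered in first-appearance order), relying on stability for identical per-group order.
import Mathlib
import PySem

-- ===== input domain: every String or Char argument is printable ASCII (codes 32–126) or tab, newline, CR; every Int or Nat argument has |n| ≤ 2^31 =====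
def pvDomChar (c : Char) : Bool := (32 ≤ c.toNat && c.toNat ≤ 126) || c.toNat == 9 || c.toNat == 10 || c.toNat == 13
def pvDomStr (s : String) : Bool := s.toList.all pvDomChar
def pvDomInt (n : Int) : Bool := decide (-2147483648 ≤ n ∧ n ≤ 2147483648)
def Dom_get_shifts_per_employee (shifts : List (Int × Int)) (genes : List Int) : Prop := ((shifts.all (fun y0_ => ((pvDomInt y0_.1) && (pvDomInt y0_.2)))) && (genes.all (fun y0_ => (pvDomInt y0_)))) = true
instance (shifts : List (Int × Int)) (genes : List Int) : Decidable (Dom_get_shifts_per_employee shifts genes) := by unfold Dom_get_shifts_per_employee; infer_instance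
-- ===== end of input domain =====

-- B replaces A's group-then-sort-each-group by one global stable sort of the (shift, gene) pairs
-- followed by a single grouping pass (alternative decomposition; return value proved identical).

-- ===== PORT A =====
def get_shifts_per_employee (shifts : List (Int × Int)) (genes : List Int) : List (Int × List (Int × Int)) :=
  -- result = {}; for shift, gene in zip(shifts, genes): append or create
  let result : PySem.Dict Int (List (Int × Int)) :=
    (shifts.zip genes).foldl
      (fun d p => if d.contains p.2 then d.modify p.2 [] (fun l => l ++ [p.1]) else d.insert p.2 [p.1])
      PySem.Dict.empty
  -- for gene in result: result[gene] = sorted(result[gene], key=lambda x: x[0], reverse=False)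
  let result2 :=
    result.keys.foldl (fun d g => d.insert g (PySem.List.sorted (d.getD g []) (fun x => x.1) false)) result
  result2.items

-- ===== PORT B =====
def get_shifts_per_employee_alt (shifts : List (Int × Int)) (genes : List Int) : List (Int × List (Int × Int)) :=
  -- pairs = sorted(zip(shifts, genes), key=lambda p: p[0][0])
  let pairs := PySem.List.sorted (shifts.zip genes) (fun p => p.1.1) false
  -- for _shift, gene in zip(shifts, genes): if gene not in result: result[gene] = []
  let d0 : PySem.Dict Int (List (Int × Int)) :=
    (shifts.zip genes).foldl (fun d p => if d.contains p.2 then d else d.insert p.2 []) PySem.Dict.empty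
  -- for shift, gene in pairs: result[gene].append(shift)
  let d := pairs.foldl (fun d p => d.modify p.2 [] (fun l => l ++ [p.1])) d0
  d.items

-- ===== PRECONDITION & SPEC =====
def Spec_get_shifts_per_employee (shifts : List (Int × Int)) (genes : List Int) (out : List (Int × List (Int × Int))) : Prop := out = get_shifts_per_employee_alt shifts genes
instance (shifts : List (Int × Int)) (genes : List Int) (out : List (Int × List (Int × Int))) : Decidable (Spec_get_shifts_per_employee shifts genes out) := by unfold Spec_get_shifts_per_employee; infer_instance

-- ===== CLAIM (what is proved, stated in full; the proofs are below) =====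
def Claim_equal_get_shifts_per_employee : Prop := ∀ (shifts : List (Int × Int)) (genes : List Int), Dom_get_shifts_per_employee shifts genes → Spec_get_shifts_per_employee shifts genes (get_shifts_per_employee shifts genes)

-- ===== LEMMAS AND PROOFS =====

lemma insertBy_front {α κ : Type} [LinearOrder κ] (key : α → κ) (x : α) (ys : List α)
    (h : ∀ z ∈ ys, key x < key z) :
    PySem.List.insertBy (fun a b => decide (key a < key b)) x ys = x :: ys := by
  cases ys with
  | nil => rfl
  | cons y t => simp [PySem.List.insertBy, h y (by simp)]

lemma map_insertBy {α β κ : Type} [LinearOrder κ] (f : α → β) (key : β → κ) (x : α) (ys : List α) :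
    (PySem.List.insertBy (fun a b => decide (key (f a) < key (f b))) x ys).map f
    = PySem.List.insertBy (fun a b => decide (key a < key b)) (f x) (ys.map f) := by
  induction ys with
  | nil => rfl
  | cons y t ih =>
    by_cases h : key (f x) < key (f y) <;> simp [PySem.List.insertBy, h, ih]

lemma sorted_map {α β κ : Type} [LinearOrder κ] (f : α → β) (key : β → κ) (l : List α) :
    (PySem.List.sorted l (fun a => key (f a)) false).map f
    = PySem.List.sorted (l.map f) key false := by
  induction l using List.reverseRecOn with
  | nil => rfl
  | append_singleton xs x ih =>
    rw [PySem.List.sorted_eq_foldl_insertBy, PySem.List.sorted_eq_foldl_insertBy,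
        List.map_append, List.foldl_append, List.foldl_append]
    simp only [List.map_cons, List.map_nil, List.foldl_cons, List.foldl_nil]
    rw [← PySem.List.sorted_eq_foldl_insertBy, ← PySem.List.sorted_eq_foldl_insertBy,
        map_insertBy, ih]

lemma filter_insertBy {α κ : Type} [LinearOrder κ] (key : α → κ) (p : α → Bool) (x : α) (ys : List α)
    (h : ys.Pairwise (fun a b => key a ≤ key b)) :
    (PySem.List.insertBy (fun a b => decide (key a < key b)) x ys).filter p
    = if p x then PySem.List.insertBy (fun a b => decide (key a < key b)) x (ys.filter p)
      else ys.filter p := by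
  induction ys with
  | nil => cases hx : p x <;> simp [PySem.List.insertBy, hx]
  | cons y t ih =>
    obtain ⟨hy, ht⟩ := List.pairwise_cons.1 h
    by_cases hxy : key x < key y
    · have hfront : ∀ z ∈ t.filter p, key x < key z := by
        intro z hz
        exact lt_of_lt_of_le hxy (hy z (List.mem_of_mem_filter hz))
      cases hx : p x <;> cases hyp : p y <;>
        simp [PySem.List.insertBy, hxy, hx, hyp, insertBy_front key x _ hfront]
    · cases hx : p x <;> cases hyp : p y <;>
        simp [PySem.List.insertBy, hxy, hx, hyp, ih ht]

lemma sorted_append_singleton {α κ : Type} [LinearOrder κ] (key : α → κ) (xs : List α) (x : α) :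
    PySem.List.sorted (xs ++ [x]) key false
    = PySem.List.insertBy (fun a b => decide (key a < key b)) x (PySem.List.sorted xs key false) := by
  rw [PySem.List.sorted_eq_foldl_insertBy, PySem.List.sorted_eq_foldl_insertBy, List.foldl_append]
  rfl

lemma sorted_filter {α κ : Type} [LinearOrder κ] (key : α → κ) (p : α → Bool) (l : List α) :
    (PySem.List.sorted l key false).filter p = PySem.List.sorted (l.filter p) key false := by
  induction l using List.reverseRecOn with
  | nil => rfl
  | append_singleton xs x ih =>
    rw [sorted_append_singleton,
        filter_insertBy key p x _ (PySem.List.sorted_pairwise xs key), ih, List.filter_append]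
    cases hx : p x
    · simp [hx]
    · simp only [hx, if_true, List.filter_cons, List.filter_nil]
      rw [sorted_append_singleton]

lemma set_update_self {α : Type} [BEq α] [LawfulBEq α] (s : PySem.Set α) (l : List α)
    (h : ∀ x ∈ l, x ∈ s) :
    PySem.Set.update s l = s := by
  induction l generalizing s with
  | nil => rfl
  | cons x l ih =>
    have hadd : PySem.Set.add s x = s := by
      simp [PySem.Set.add, PySem.Set.contains, h x (by simp)]
    have : PySem.Set.update s (x :: l) = PySem.Set.update (PySem.Set.add s x) l := rfl
    rw [this, hadd]
    exact ih s (fun y hy => h y (List.mem_cons_of_mem _ hy))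

lemma d0_spec (l : List ((Int × Int) × Int)) (d : PySem.Dict Int (List (Int × Int)))
    (hk : d.keys.Nodup) (hv : ∀ g, d.getD g [] = []) :
    (List.foldl (fun d p => if d.contains p.2 then d else d.insert p.2 []) d l).keys
        = PySem.Set.update d.keys (l.map (fun p => p.2))
    ∧ (List.foldl (fun d p => if d.contains p.2 then d else d.insert p.2 []) d l).keys.Nodup
    ∧ ∀ g, (List.foldl (fun d p => if d.contains p.2 then d else d.insert p.2 []) d l).getD g [] = [] := by
  induction l generalizing d with
  | nil => exact ⟨rfl, hk, hv⟩
  | cons q l ih =>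
    simp only [List.foldl_cons, List.map_cons]
    have hupd : ∀ s, PySem.Set.update s (q.2 :: l.map (fun p => p.2))
        = PySem.Set.update (PySem.Set.add s q.2) (l.map (fun p => p.2)) := fun _ => rfl
    by_cases hc : d.contains q.2 = true
    · have hadd : PySem.Set.add d.keys q.2 = d.keys := by
        have : q.2 ∈ d.keys := (PySem.Dict.contains_iff_mem_keys d q.2).1 hc
        simp [PySem.Set.add, PySem.Set.contains, this]
      rw [if_pos hc]
      obtain ⟨h1, h2, h3⟩ := ih d hk hv
      exact ⟨by rw [hupd, hadd, h1], h2, h3⟩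
    · have hc' : d.contains q.2 = false := by simpa using hc
      have hkeys : (d.insert q.2 ([] : List (Int × Int))).keys = d.keys ++ [q.2] :=
        PySem.Dict.keys_insert_of_not_contains d _ hc'
      have hadd : PySem.Set.add d.keys q.2 = d.keys ++ [q.2] := by
        have : q.2 ∉ d.keys := fun hm => by
          rw [← PySem.Dict.contains_iff_mem_keys] at hm; simp [hm] at hc'
        simp [PySem.Set.add, PySem.Set.contains, this]
      rw [if_neg hc]
      obtain ⟨h1, h2, h3⟩ := ih (d.insert q.2 [])
        (PySem.Dict.nodup_keys_insert d q.2 [] hk)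
        (fun g => by rw [PySem.Dict.getD_insert]; split <;> [rfl; exact hv g])
      exact ⟨by rw [hupd, hadd, ← hkeys, h1], h2, h3⟩

lemma loop2_spec (ks : List Int) (d : PySem.Dict Int (List (Int × Int))) (hnd : ks.Nodup)
    (hsub : ∀ k ∈ ks, d.contains k = true) :
    (List.foldl (fun d g => d.insert g (PySem.List.sorted (d.getD g []) (fun x => x.1) false)) d ks).keys = d.keys
    ∧ ∀ g, (List.foldl (fun d g => d.insert g (PySem.List.sorted (d.getD g []) (fun x => x.1) false)) d ks).getD g []
      = if g ∈ ks then PySem.List.sorted (d.getD g []) (fun x => x.1) false else d.getD g [] := by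
  induction ks generalizing d with
  | nil => simp
  | cons k ks ih =>
    obtain ⟨hk, hnd'⟩ := List.nodup_cons.1 hnd
    have hkc : d.contains k = true := hsub k (by simp)
    have hkeys1 : (d.insert k (PySem.List.sorted (d.getD k []) (fun x => x.1) false)).keys = d.keys :=
      PySem.Dict.keys_insert_of_contains d _ hkc
    have hsub1 : ∀ j ∈ ks, (d.insert k (PySem.List.sorted (d.getD k []) (fun x => x.1) false)).contains j = true := by
      intro j hj
      have := hsub j (List.mem_cons_of_mem _ hj)
      rw [PySem.Dict.contains_iff_mem_keys] at this ⊢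
      rwa [hkeys1]
    obtain ⟨h1, h2⟩ := ih (d.insert k (PySem.List.sorted (d.getD k []) (fun x => x.1) false)) hnd' hsub1
    refine ⟨by simpa [hkeys1] using h1, ?_⟩
    intro g
    simp only [List.foldl_cons] at h2 ⊢
    rw [h2 g]
    by_cases hg : g ∈ ks
    · have hgk : g ≠ k := fun h => hk (h ▸ hg)
      simp [hg, PySem.Dict.getD_insert, hgk]
    · by_cases hgk : g = k
      · subst hgk
        simp [hg]
      · simp [hg, hgk, PySem.Dict.getD_insert]

-- the grouping fold with key p.2 / value p.1, characterised via the swapped-pair library lemma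
lemma getD_group_fold (l : List ((Int × Int) × Int)) (d : PySem.Dict Int (List (Int × Int))) (g : Int) :
    (List.foldl (fun d p => d.modify p.2 [] (fun v => v ++ [p.1])) d l).getD g []
    = d.getD g [] ++ (l.filter (fun p => p.2 == g)).map (fun p => p.1) := by
  have h : List.foldl (fun d p => d.modify p.2 [] (fun v => v ++ [p.1])) d l
      = List.foldl (fun d q => d.modify q.1 [] (fun v => v ++ [q.2])) d (l.map Prod.swap) := by
    rw [List.foldl_map]
    rfl
  rw [h, PySem.Dict.getD_foldl_modify_append]
  simp [List.filter_map, List.map_map, Function.comp_def]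

lemma ports_eq (shifts : List (Int × Int)) (genes : List Int) :
    get_shifts_per_employee shifts genes = get_shifts_per_employee_alt shifts genes := by
  unfold get_shifts_per_employee get_shifts_per_employee_alt
  simp only []
  set zl := shifts.zip genes with hzl
  set pg : Int → ((Int × Int) × Int) → Bool := fun g p => p.2 == g with hpg
  -- A's first loop is the unconditional modify loop
  have hA1 : List.foldl
      (fun d p => if d.contains p.2 then d.modify p.2 [] (fun l => l ++ [p.1]) else d.insert p.2 [p.1])
      PySem.Dict.empty zl
      = List.foldl (fun d p => d.modify p.2 [] (fun l => l ++ [p.1])) PySem.Dict.empty zl := by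
    apply PySem.List.foldl_congr_mem
    intro acc p _
    by_cases hc : acc.contains p.2 = true
    · rw [if_pos hc]
    · rw [if_neg hc]
      have hc' : acc.contains p.2 = false := by simpa using hc
      simp [PySem.Dict.modify, PySem.Dict.getD_of_not_contains acc _ hc']
  rw [hA1]
  set M := List.foldl (fun d p => d.modify p.2 [] (fun l => l ++ [p.1]))
      (PySem.Dict.empty : PySem.Dict Int (List (Int × Int))) zl with hM
  set K := PySem.Set.ofList (zl.map (fun p => p.2)) with hK
  have hMkeys : M.keys = K := by
    rw [hM, PySem.Dict.keys_foldl_modify_key zl (fun p => p.2) [] (fun _ p => fun l => l ++ [p.1]), hK,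
        PySem.Set.ofList_eq_foldl]
    rfl
  have hMnodup : M.keys.Nodup := by
    rw [hM]
    exact PySem.Dict.nodup_keys_foldl_modify_key zl (fun p => p.2) [] (fun _ p => fun l => l ++ [p.1])
      PySem.Dict.empty PySem.Dict.nodup_keys_empty
  have hMgetD : ∀ g, M.getD g [] = (zl.filter (pg g)).map (fun p => p.1) := by
    intro g
    rw [hM, getD_group_fold]
    simp [hpg]
  -- A's second loop
  obtain ⟨hA2keys, hA2getD⟩ := loop2_spec M.keys M hMnodup
      (fun k hk => (PySem.Dict.contains_iff_mem_keys M k).2 hk)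
  -- B's d0
  obtain ⟨hd0keys, hd0nodup, hd0getD⟩ := d0_spec zl PySem.Dict.empty PySem.Dict.nodup_keys_empty
      (fun g => PySem.Dict.getD_empty g [])
  set d0 : PySem.Dict Int (List (Int × Int)) :=
      List.foldl (fun d p => if d.contains p.2 then d else d.insert p.2 [])
        (PySem.Dict.empty : PySem.Dict Int (List (Int × Int))) zl with hd0
  have hd0K : d0.keys = K := by
    rw [hd0, hd0keys, hK, PySem.Set.ofList_eq_foldl]; rfl
  set pairs := PySem.List.sorted zl (fun p => p.1.1) false with hpairs
  set dB := List.foldl (fun d p => d.modify p.2 [] (fun l => l ++ [p.1])) d0 pairs with hdB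
  have hdBkeys : dB.keys = K := by
    rw [hdB, PySem.Dict.keys_foldl_modify_key pairs (fun p => p.2) [] (fun _ p => fun l => l ++ [p.1])]
    rw [hd0K]
    apply set_update_self
    intro x hx
    obtain ⟨p, hp, rfl⟩ := List.mem_map.1 hx
    have hpz : p ∈ zl := (PySem.List.mem_sorted zl _ _ p).1 hp
    rw [hK, PySem.Set.mem_ofList]
    exact List.mem_map_of_mem hpz
  have hdBnodup : dB.keys.Nodup := by
    rw [hdB]
    exact PySem.Dict.nodup_keys_foldl_modify_key pairs (fun p => p.2) [] (fun _ p => fun l => l ++ [p.1])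
      d0 hd0nodup
  have hdBgetD : ∀ g, dB.getD g [] = (pairs.filter (pg g)).map (fun p => p.1) := by
    intro g
    rw [hdB, getD_group_fold, hd0getD]
    simp [hpg]
  -- items on both sides
  rw [PySem.Dict.items_eq_map_keys _ (by rwa [hA2keys]) [], PySem.Dict.items_eq_map_keys dB hdBnodup []]
  rw [hA2keys, hdBkeys, ← hMkeys]
  apply List.map_congr_left
  intro g hgM
  rw [hA2getD g, if_pos hgM, hMgetD g, hdBgetD g, hpairs]
  rw [sorted_filter (fun p => p.1.1) (pg g) zl]
  exact congrArg (fun v => (g, v)) (sorted_map Prod.fst (fun x => x.1) (zl.filter (pg g))).symm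

-- ===== VERDICT (by name: the statement is the Claim_ definition above) =====
theorem get_shifts_per_employee_spec : Claim_equal_get_shifts_per_employee := by
  intro shifts genes _
  unfold Spec_get_shifts_per_employee
  exact ports_eq shifts genes
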